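-- pv_equiv track=rewrite | github.com/tkarani1/compgenome-hw4 | hw4q3_1.py | make_BMR_BML
-- ===== SOURCE A (Python) =====
-- def make_BMR_BML(records):
--     BMR = {}
--     BML = {}
--
--     # TIES?!?!
--     for (left, nt, right) in records:
--         if left in BMR:
--             BMR[left] = (right, nt) if nt > (BMR[left])[1] else BMR[left]
--         else:
--             BMR[left] = (right, nt)
--
--         if right in BML:
--             BML[right] = (left, nt) if nt > (BML[right])[1] else BML[right]
--         else:
--             BML[right] = (left, nt)
--     return BMR, BML
-- ===== SOURCE B (Python) =====
-- def make_BMR_BML(records):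
--     # Two-pass: bucket the records by left / by right, then take the
--     # first-maximal element of each bucket (max keeps the earliest on ties,
--     # matching the keep-existing-on-equal rule).
--     groupsL = {}
--     groupsR = {}
--     for (left, nt, right) in records:
--         groupsL.setdefault(left, []).append((right, nt))
--         groupsR.setdefault(right, []).append((left, nt))
--     BMR = {k: max(b, key=lambda t: t[1]) for k, b in groupsL.items()}
--     BML = {k: max(b, key=lambda t: t[1]) for k, b in groupsR.items()}
--     return BMR, BML
-- ===== Notes on version B (the rewrite author's own statement) =====
-- stated objective: alternative
-- what changed: Replaces the single pass that rewrites the running best per key on every record by a two-pass grouping: first bucket the records by left/right key, then take the first-maximal element of each bucket with max(bucket, key=nt).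
import Mathlib
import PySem

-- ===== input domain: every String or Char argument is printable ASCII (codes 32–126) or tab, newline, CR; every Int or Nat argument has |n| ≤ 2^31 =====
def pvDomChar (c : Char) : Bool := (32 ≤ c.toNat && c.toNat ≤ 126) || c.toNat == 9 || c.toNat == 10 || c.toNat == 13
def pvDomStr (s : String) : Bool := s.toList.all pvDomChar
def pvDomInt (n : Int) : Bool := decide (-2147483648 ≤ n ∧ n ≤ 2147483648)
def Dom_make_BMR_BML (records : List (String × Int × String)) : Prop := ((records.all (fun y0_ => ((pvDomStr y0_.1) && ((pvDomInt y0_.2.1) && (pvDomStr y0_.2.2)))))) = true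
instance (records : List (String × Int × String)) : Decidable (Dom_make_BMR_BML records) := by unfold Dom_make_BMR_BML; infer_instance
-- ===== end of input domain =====

-- B replaces A's running-best-per-key single pass by a two-pass grouping (bucket by key, then
-- first-maximal of each bucket); alternative decomposition, return value proved equal.


-- ===== PORT A =====
-- literal transliteration of A: one pass, each dict keeps the running best per key
-- ('BMR[left]' is only read under the 'left in BMR' guard, so getD's default is never the result).
def make_BMR_BML (records : List (String × Int × String)) :
    (List (String × String × Int)) × (List (String × String × Int)) :=
  let st := records.foldl
    (fun (st : PySem.Dict String (String × Int) × PySem.Dict String (String × Int)) r =>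
      match r with
      | (left, nt, right) =>
        let bmr :=
          if st.1.contains left then
            st.1.insert left
              (if nt > (st.1.getD left ("", 0)).2 then (right, nt) else st.1.getD left ("", 0))
          else
            st.1.insert left (right, nt)
        let bml :=
          if st.2.contains right then
            st.2.insert right
              (if nt > (st.2.getD right ("", 0)).2 then (left, nt) else st.2.getD right ("", 0))
          else
            st.2.insert right (left, nt)
        (bmr, bml))
    (PySem.Dict.empty, PySem.Dict.empty)
  (st.1.items, st.2.items)

-- ===== PORT B =====
-- max(b, key=lambda t: t[1]); buckets are nonempty, so the default is never the result
def pyMaxByNt (b : List (String × Int)) : String × Int :=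
  (PySem.List.max? b (fun t => t.2)).getD ("", 0)

def make_BMR_BML_alt (records : List (String × Int × String)) :
    (List (String × String × Int)) × (List (String × String × Int)) :=
  let groupsL := records.foldl
    (fun d r => match r with
      | (left, nt, right) => d.modify left [] (fun b => b ++ [(right, nt)]))
    PySem.Dict.empty
  let groupsR := records.foldl
    (fun d r => match r with
      | (left, nt, right) => d.modify right [] (fun b => b ++ [(left, nt)]))
    PySem.Dict.empty
  let bmr := PySem.Dict.mk (groupsL.items.map (fun kb => (kb.1, pyMaxByNt kb.2)))
  let bml := PySem.Dict.mk (groupsR.items.map (fun kb => (kb.1, pyMaxByNt kb.2)))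
  (bmr.items, bml.items)

-- ===== PRECONDITION & SPEC =====
def Spec_make_BMR_BML (records : List (String × Int × String)) (out : (List (String × String × Int)) × (List (String × String × Int))) : Prop := out = make_BMR_BML_alt records
instance (records : List (String × Int × String)) (out : (List (String × String × Int)) × (List (String × String × Int))) : Decidable (Spec_make_BMR_BML records out) := by unfold Spec_make_BMR_BML; infer_instance

-- ===== CLAIM (what is proved, stated in full; the proofs are below) =====
def Claim_equal_make_BMR_BML : Prop := ∀ (records : List (String × Int × String)), Dom_make_BMR_BML records → Spec_make_BMR_BML records (make_BMR_BML records)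

-- ===== LEMMAS AND PROOFS =====

-- A's per-record update of one dict, abstracted over which field is the key / the payload
def pvAStep (key : String × Int × String → String) (pay : String × Int × String → String × Int)
    (d : PySem.Dict String (String × Int)) (r : String × Int × String) :
    PySem.Dict String (String × Int) :=
  if d.contains (key r) then
    d.insert (key r)
      (if (pay r).2 > (d.getD (key r) ("", 0)).2 then pay r else d.getD (key r) ("", 0))
  else
    d.insert (key r) (pay r)

-- B's per-record bucketing of one dict, abstracted the same way
def pvGStep (key : String × Int × String → String) (pay : String × Int × String → String × Int)
    (d : PySem.Dict String (List (String × Int))) (r : String × Int × String) :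
    PySem.Dict String (List (String × Int)) :=
  d.modify (key r) [] (fun b => b ++ [pay r])

-- invariant: A's dict is the bucket dict with every bucket replaced by its first maximum,
-- and every bucket is nonempty
def pvRel (g : PySem.Dict String (List (String × Int)))
    (a : PySem.Dict String (String × Int)) : Prop :=
  a.items = g.items.map (fun kb => (kb.1, pyMaxByNt kb.2)) ∧ ∀ kb ∈ g.items, kb.2 ≠ []

theorem pyMaxByNt_singleton (p : String × Int) : pyMaxByNt [p] = p := by
  simp [pyMaxByNt, PySem.List.max?]

theorem pyMaxByNt_append (b : List (String × Int)) (m p : String × Int)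
    (hm : PySem.List.max? b (fun t => t.2) = some m) :
    pyMaxByNt (b ++ [p]) = if p.2 > m.2 then p else m := by
  unfold pyMaxByNt
  unfold PySem.List.max? at hm ⊢
  rw [List.foldl_append, hm]
  simp only [List.foldl]
  by_cases h : m.2 < p.2 <;> simp [h, gt_iff_lt]

theorem pvStep (key : String × Int × String → String) (pay : String × Int × String → String × Int)
    (g : PySem.Dict String (List (String × Int))) (a : PySem.Dict String (String × Int))
    (r : String × Int × String) (h : pvRel g a) :
    pvRel (pvGStep key pay g r) (pvAStep key pay a r) := by
  obtain ⟨h1, h2⟩ := h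
  have hc : a.contains (key r) = g.contains (key r) := by
    simp only [PySem.Dict.contains, h1, List.any_map]
    rfl
  by_cases hgc : g.contains (key r) = true
  · -- key already present: both dicts rewrite the entry in place
    have hany : g.items.any (fun p => p.1 == key r) = true := hgc
    cases hfind : g.items.find? (fun p => p.1 == key r) with
    | none =>
      exfalso
      rw [List.find?_eq_none] at hfind
      rcases List.any_eq_true.mp hany with ⟨q, hq, hqk⟩
      exact absurd hqk (by simpa using hfind q hq)
    | some q =>
      have hq_mem := List.mem_of_find?_eq_some hfind
      have hqk := List.find?_some hfind
      have hq_ne : q.2 ≠ [] := h2 q hq_mem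
      -- the first maximum of the existing bucket
      obtain ⟨m, hm⟩ : ∃ m, PySem.List.max? q.2 (fun t => t.2) = some m := by
        cases hmx : PySem.List.max? q.2 (fun t => t.2) with
        | none => exact absurd ((PySem.List.max?_eq_none_iff _ _).mp hmx) hq_ne
        | some m => exact ⟨m, rfl⟩
      have hbest : pyMaxByNt q.2 = m := by simp [pyMaxByNt, hm]
      have hgget : g.getD (key r) [] = q.2 := by
        simp [PySem.Dict.getD, PySem.Dict.get?, hfind]
      have haget : a.getD (key r) ("", 0) = m := by
        have : a.items.find? (fun p => p.1 == key r)
            = (g.items.find? (fun p => p.1 == key r)).map (fun kb => (kb.1, pyMaxByNt kb.2)) := by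
          rw [h1, List.find?_map]; rfl
        simp [PySem.Dict.getD, PySem.Dict.get?, this, hfind, hbest]
      have hac : a.contains (key r) = true := by rw [hc]; exact hgc
      have hnew : pyMaxByNt (q.2 ++ [pay r]) = if (pay r).2 > m.2 then pay r else m :=
        pyMaxByNt_append q.2 m (pay r) hm
      constructor
      · show (pvAStep key pay a r).items = _
        unfold pvAStep pvGStep PySem.Dict.modify PySem.Dict.insert
        rw [hac, hgc, hgget, haget]
        simp only [if_true, h1, List.map_map]
        apply List.map_congr_left
        intro pp _
        by_cases hppk : (pp.1 == key r) = true <;>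
          simp [Function.comp, hppk, hnew]
      · intro kb hkb
        unfold pvGStep PySem.Dict.modify PySem.Dict.insert at hkb
        rw [hgc, hgget] at hkb
        simp only [if_true, List.mem_map] at hkb
        obtain ⟨pp, hpp, hkbeq⟩ := hkb
        by_cases hppk : (pp.1 == key r) = true
        · rw [if_pos hppk] at hkbeq; subst hkbeq; simp
        · rw [if_neg hppk] at hkbeq; subst hkbeq; exact h2 pp hpp
  · -- new key: both dicts append the entry
    have hgc' : g.contains (key r) = false := by simpa using hgc
    have hac : a.contains (key r) = false := by rw [hc]; exact hgc'
    have hfind : g.items.find? (fun p => p.1 == key r) = none := by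
      rw [List.find?_eq_none]
      intro q hq
      simp only [PySem.Dict.contains, List.any_eq_false] at hgc'
      exact hgc' q hq
    have hgget : g.getD (key r) [] = [] := by
      simp [PySem.Dict.getD, PySem.Dict.get?, hfind]
    constructor
    · show (pvAStep key pay a r).items = _
      unfold pvAStep pvGStep PySem.Dict.modify
      rw [hac, hgget]
      unfold PySem.Dict.insert
      rw [hac, hgc']
      simp [h1, pyMaxByNt_singleton]
    · intro kb hkb
      unfold pvGStep PySem.Dict.modify PySem.Dict.insert at hkb
      rw [hgc', hgget] at hkb
      simp only [Bool.false_eq_true, if_false, List.mem_append, List.mem_singleton] at hkb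
      rcases hkb with hkb | hkb
      · exact h2 kb hkb
      · subst hkb; simp
    
theorem pvFold (key : String × Int × String → String) (pay : String × Int × String → String × Int)
    (l : List (String × Int × String)) :
    ∀ (g : PySem.Dict String (List (String × Int))) (a : PySem.Dict String (String × Int)),
      pvRel g a → pvRel (l.foldl (pvGStep key pay) g) (l.foldl (pvAStep key pay) a) := by
  induction l with
  | nil => intro g a h; exact h
  | cons r t ih =>
    intro g a h
    exact ih _ _ (pvStep key pay g a r h)

theorem foldl_pair {α β ρ : Type} (f : α → ρ → α) (g : β → ρ → β) :
    ∀ (l : List ρ) (a : α) (b : β),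
      l.foldl (fun st r => (f st.1 r, g st.2 r)) (a, b) = (l.foldl f a, l.foldl g b) := by
  intro l
  induction l with
  | nil => intro a b; rfl
  | cons r t ih => intro a b; simp [List.foldl, ih]

-- ===== VERDICT (by name: the statement is the Claim_ definition above) =====
theorem make_BMR_BML_spec : Claim_equal_make_BMR_BML := by
  intro records _
  unfold Spec_make_BMR_BML make_BMR_BML make_BMR_BML_alt
  have hstep : (fun (st : PySem.Dict String (String × Int) × PySem.Dict String (String × Int))
      (r : String × Int × String) =>
      match r with
      | (left, nt, right) =>
        let bmr :=
          if st.1.contains left then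
            st.1.insert left
              (if nt > (st.1.getD left ("", 0)).2 then (right, nt) else st.1.getD left ("", 0))
          else
            st.1.insert left (right, nt)
        let bml :=
          if st.2.contains right then
            st.2.insert right
              (if nt > (st.2.getD right ("", 0)).2 then (left, nt) else st.2.getD right ("", 0))
          else
            st.2.insert right (left, nt)
        (bmr, bml))
      = (fun st r =>
          (pvAStep (fun r => r.1) (fun r => (r.2.2, r.2.1)) st.1 r,
           pvAStep (fun r => r.2.2) (fun r => (r.1, r.2.1)) st.2 r)) := by
    funext st r
    obtain ⟨left, nt, right⟩ := r
    rfl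
  have hgl : (fun (d : PySem.Dict String (List (String × Int))) (r : String × Int × String) =>
      match r with
      | (left, nt, right) => d.modify left [] (fun b => b ++ [(right, nt)]))
      = pvGStep (fun r => r.1) (fun r => (r.2.2, r.2.1)) := by
    funext d r
    obtain ⟨left, nt, right⟩ := r
    rfl
  have hgr : (fun (d : PySem.Dict String (List (String × Int))) (r : String × Int × String) =>
      match r with
      | (left, nt, right) => d.modify right [] (fun b => b ++ [(left, nt)]))
      = pvGStep (fun r => r.2.2) (fun r => (r.1, r.2.1)) := by
    funext d r
    obtain ⟨left, nt, right⟩ := r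
    rfl
  rw [hstep, hgl, hgr, foldl_pair]
  have hL := (pvFold (fun r => r.1) (fun r => (r.2.2, r.2.1)) records
      PySem.Dict.empty PySem.Dict.empty ⟨rfl, by intro kb h; cases h⟩).1
  have hR := (pvFold (fun r => r.2.2) (fun r => (r.1, r.2.1)) records
      PySem.Dict.empty PySem.Dict.empty ⟨rfl, by intro kb h; cases h⟩).1
  simp only []
  exact Prod.ext (by exact hL) (by exact hR)
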